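-- pv_equiv track=rewrite | github.com/Uxinnn/Advent-of-Code | 2024/day14/day14.py | check_heuristics
-- ===== SOURCE A (Python) =====
-- def check_heuristics(state):
--   """
--   Check if there is a long row of robots in the state.
--   Return True if so.
--   """
--   positions = set(state)
--   max_len = 0
--   while positions:
--     row_len = 1
--     i, j = positions.pop()
--     # Go backwards until there is no more robots in the row.
--     i2, j2 = i - 1, j
--     while (i2, j2) in positions:
--       positions.remove((i2, j2))
--       row_len += 1
--       i2 -= 1
--     # Go forward until there is no more robots in the row.
--     i2, j2 = i + 1, j
--     while (i2, j2) in positions: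
--       positions.remove((i2, j2))
--       row_len += 1
--       i2 += 1
--     max_len = max(max_len, row_len)
--   min_row_len = 16
--   return max_len > min_row_len
-- ===== SOURCE B (Python) =====
-- def check_heuristics(state):
--   """
--   Check if there is a long row of robots in the state.
--   Return True if so.
--   """
--   pts = set(state)
--   # A run longer than 16 exists iff some robot has the next 16 cells
--   # of its row occupied; test each point's 17-cell window by membership.
--   return any(all((i + d, j) in pts for d in range(1, 17)) for (i, j) in pts)
-- ===== Notes on version B (the rewrite author's own statement) =====
-- stated objective: simpler
-- what changed: Replaces the destructive pop-and-flood set expansion tracking a global max run length with a single non-destructive membership test: a run longer than 16 exists iff some point has the 16 following cells of its row in the set.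
import Mathlib
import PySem

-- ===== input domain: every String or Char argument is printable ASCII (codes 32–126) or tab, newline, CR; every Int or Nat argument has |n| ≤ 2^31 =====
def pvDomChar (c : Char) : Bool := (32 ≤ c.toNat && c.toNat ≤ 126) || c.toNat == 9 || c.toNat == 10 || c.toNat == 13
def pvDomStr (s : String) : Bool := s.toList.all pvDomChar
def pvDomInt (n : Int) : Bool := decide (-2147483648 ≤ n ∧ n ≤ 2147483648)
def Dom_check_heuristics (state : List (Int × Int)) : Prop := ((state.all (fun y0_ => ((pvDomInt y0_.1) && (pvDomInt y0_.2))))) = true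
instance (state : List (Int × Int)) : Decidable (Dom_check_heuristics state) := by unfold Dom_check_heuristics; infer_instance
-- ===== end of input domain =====

-- B replaces A's destructive pop-and-flood max-run-length computation by a
-- non-destructive membership test (simpler): a row run longer than 16 exists iff
-- some point has the 16 following cells of its row in the set. A consumes its set
-- via pop() in unspecified hash order, but its result is order-independent (each
-- pop removes one whole maximal run); the port pops the first element.

-- ===== PORT A =====
-- (fuel = current set size bounds both inner loops and the outer loop: each step
--  removes one element, so the fuel guard is never the branch taken — pure totalization)
-- 'while (i2, j2) in positions: positions.remove((i2, j2)); row_len += 1; i2 -= 1'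
def goBack : Nat → List (Int × Int) → Int → Int → Nat → List (Int × Int) × Nat
  | 0, pos, _, _, len => (pos, len)
  | fuel + 1, pos, i2, j, len =>
      if (i2, j) ∈ pos then
        goBack fuel (pos.erase (i2, j)) (i2 - 1) j (len + 1)
      else
        (pos, len)

-- 'while (i2, j2) in positions: positions.remove((i2, j2)); row_len += 1; i2 += 1'
def goFwd : Nat → List (Int × Int) → Int → Int → Nat → List (Int × Int) × Nat
  | 0, pos, _, _, len => (pos, len)
  | fuel + 1, pos, i2, j, len =>
      if (i2, j) ∈ pos then
        goFwd fuel (pos.erase (i2, j)) (i2 + 1) j (len + 1)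
      else
        (pos, len)

-- 'while positions: row_len = 1; i, j = positions.pop(); … ; max_len = max(max_len, row_len)'
def loopA : Nat → List (Int × Int) → Nat → Nat
  | 0, _, maxLen => maxLen
  | fuel + 1, pos, maxLen =>
      match pos with
      | [] => maxLen
      | (i, j) :: rest =>
          let r1 := goBack rest.length rest (i - 1) j 1
          let r2 := goFwd r1.1.length r1.1 (i + 1) j r1.2
          loopA fuel r2.1 (max maxLen r2.2)

def check_heuristics (state : List (Int × Int)) : Bool :=
  let positions := PySem.Set.ofList state
  let maxLen := loopA positions.length positions 0
  let minRowLen : Nat := 16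
  decide (minRowLen < maxLen)

-- ===== PORT B =====
def check_heuristics_alt (state : List (Int × Int)) : Bool :=
  let pts := PySem.Set.ofList state
  pts.any (fun p =>
    (PySem.List.pyRange 1 17 1).all (fun d => PySem.Set.contains pts (p.1 + d, p.2)))

-- ===== PRECONDITION & SPEC =====
def Spec_check_heuristics (state : List (Int × Int)) (out : Bool) : Prop := out = check_heuristics_alt state
instance (state : List (Int × Int)) (out : Bool) : Decidable (Spec_check_heuristics state out) := by unfold Spec_check_heuristics; infer_instance

-- ===== CLAIM (what is proved, stated in full; the proofs are below) =====
def Claim_equal_check_heuristics : Prop := ∀ (state : List (Int × Int)), Dom_check_heuristics state → Spec_check_heuristics state (check_heuristics state)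

-- ===== LEMMAS AND PROOFS =====

theorem goBack_len_le (fuel : Nat) (pos : List (Int × Int)) (i j : Int) (len : Nat) :
    (goBack fuel pos i j len).1.length ≤ pos.length := by
  induction fuel generalizing pos i len with
  | zero => simp [goBack]
  | succ fuel ih =>
      by_cases h : (i, j) ∈ pos
      · have h1 := List.length_erase_of_mem h
        have h2 := List.length_pos_of_mem h
        have h3 := ih (pos.erase (i, j)) (i - 1) (len + 1)
        simp only [goBack, if_pos h]
        omega
      · simp [goBack, h]

theorem goFwd_len_le (fuel : Nat) (pos : List (Int × Int)) (i j : Int) (len : Nat) :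
    (goFwd fuel pos i j len).1.length ≤ pos.length := by
  induction fuel generalizing pos i len with
  | zero => simp [goFwd]
  | succ fuel ih =>
      by_cases h : (i, j) ∈ pos
      · have h1 := List.length_erase_of_mem h
        have h2 := List.length_pos_of_mem h
        have h3 := ih (pos.erase (i, j)) (i + 1) (len + 1)
        simp only [goFwd, if_pos h]
        omega
      · simp [goFwd, h]

-- goBack removes exactly the maximal backward chain i, i-1, …, i-n+1 in row j
-- and counts its length (fuel ≥ |pos| makes the fuel guard unreachable).
theorem goBack_spec (fuel : Nat) (pos : List (Int × Int)) (hf : pos.length ≤ fuel)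
    (hn : pos.Nodup) (i j : Int) (len : Nat) :
    ∃ n : Nat,
      (∀ t : Int, i - n < t → t ≤ i → (t, j) ∈ pos) ∧
      ((i - n, j) ∉ pos) ∧
      (goBack fuel pos i j len).2 = len + n ∧
      (∀ q : Int × Int, q ∈ (goBack fuel pos i j len).1 ↔
        q ∈ pos ∧ ¬(q.2 = j ∧ i - n < q.1 ∧ q.1 ≤ i)) ∧
      (goBack fuel pos i j len).1.Nodup := by
  induction fuel generalizing pos i len with
  | zero =>
      have hp : pos = [] := List.eq_nil_of_length_eq_zero (by omega)
      subst hp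
      refine ⟨0, ?_, ?_, ?_, ?_, ?_⟩
      · intro t h1 h2; push_cast at h1; omega
      · simp
      · simp [goBack]
      · intro q; simp [goBack]
      · simp [goBack]
  | succ fuel ih =>
      by_cases h : (i, j) ∈ pos
      · have hrw : goBack (fuel + 1) pos i j len =
            goBack fuel (pos.erase (i, j)) (i - 1) j (len + 1) := by
          simp only [goBack, if_pos h]
        have hf' : (pos.erase (i, j)).length ≤ fuel := by
          have h1 := List.length_erase_of_mem h
          have h2 := List.length_pos_of_mem h
          omega
        have hn' : (pos.erase (i, j)).Nodup := hn.erase _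
        obtain ⟨n, hmem, hstop, hlen, hiff, hnd⟩ := ih (pos := pos.erase (i, j)) (i := i - 1) (len := len + 1) (hf := hf') (hn := hn')
        have herase : ∀ q : Int × Int, q ∈ pos.erase (i, j) ↔ q ≠ (i, j) ∧ q ∈ pos :=
          fun q => List.Nodup.mem_erase_iff hn
        refine ⟨n + 1, ?_, ?_, ?_, ?_, ?_⟩
        · intro t ht1 ht2
          by_cases hti : t = i
          · subst hti; exact h
          · have : (t, j) ∈ pos.erase (i, j) := by
              apply hmem t (by push_cast at ht1 ⊢; omega) (by omega)
            exact List.mem_of_mem_erase this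
        · intro hc
          have hne : ((i - (↑(n + 1) : Int), j) : Int × Int) ≠ (i, j) := by
            simp only [ne_eq, Prod.mk.injEq, not_and]
            intro hc2; exfalso; push_cast at hc2; omega
          have : (i - (↑(n + 1) : Int), j) ∈ pos.erase (i, j) := (herase _).mpr ⟨hne, hc⟩
          have heq : (i - (↑(n + 1) : Int)) = i - 1 - (n : Int) := by push_cast; ring
          rw [heq] at this
          exact hstop this
        · rw [hrw, hlen]; omega
        · intro q
          rw [hrw, hiff q, herase q]
          obtain ⟨q1, q2⟩ := q
          constructor
          · rintro ⟨⟨hne, hq⟩, hnr⟩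
            refine ⟨hq, ?_⟩
            rintro ⟨rfl, hlt, hle⟩
            rcases eq_or_ne q1 i with rfl | hq1
            · exact hne rfl
            · push_cast at hlt
              exact hnr ⟨rfl, by push_cast; omega, by omega⟩
          · rintro ⟨hq, hnr⟩
            refine ⟨⟨?_, hq⟩, ?_⟩
            · intro heq
              rw [Prod.mk.injEq] at heq
              obtain ⟨rfl, rfl⟩ := heq
              exact hnr ⟨rfl, by push_cast; omega, by omega⟩
            · rintro ⟨rfl, hlt, hle⟩
              push_cast at hlt
              exact hnr ⟨rfl, by push_cast; omega, by omega⟩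
        · rw [hrw]; exact hnd
      · have hrw : goBack (fuel + 1) pos i j len = (pos, len) := by
          simp [goBack, h]
        refine ⟨0, ?_, ?_, ?_, ?_, ?_⟩
        · intro t ht1 ht2; exfalso; push_cast at ht1; omega
        · simpa using h
        · rw [hrw]; simp
        · intro q; rw [hrw]
          constructor
          · intro hq
            refine ⟨hq, ?_⟩
            rintro ⟨_, hlt, hle⟩; push_cast at hlt; omega
          · exact fun hq => hq.1
        · rw [hrw]; exact hn

theorem goFwd_spec (fuel : Nat) (pos : List (Int × Int)) (hf : pos.length ≤ fuel)
    (hn : pos.Nodup) (i j : Int) (len : Nat) :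
    ∃ n : Nat,
      (∀ t : Int, i ≤ t → t < i + n → (t, j) ∈ pos) ∧
      ((i + n, j) ∉ pos) ∧
      (goFwd fuel pos i j len).2 = len + n ∧
      (∀ q : Int × Int, q ∈ (goFwd fuel pos i j len).1 ↔
        q ∈ pos ∧ ¬(q.2 = j ∧ i ≤ q.1 ∧ q.1 < i + n)) ∧
      (goFwd fuel pos i j len).1.Nodup := by
  induction fuel generalizing pos i len with
  | zero =>
      have hp : pos = [] := List.eq_nil_of_length_eq_zero (by omega)
      subst hp
      refine ⟨0, ?_, ?_, ?_, ?_, ?_⟩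
      · intro t h1 h2; push_cast at h2; omega
      · simp
      · simp [goFwd]
      · intro q; simp [goFwd]
      · simp [goFwd]
  | succ fuel ih =>
      by_cases h : (i, j) ∈ pos
      · have hrw : goFwd (fuel + 1) pos i j len =
            goFwd fuel (pos.erase (i, j)) (i + 1) j (len + 1) := by
          simp only [goFwd, if_pos h]
        have hf' : (pos.erase (i, j)).length ≤ fuel := by
          have h1 := List.length_erase_of_mem h
          have h2 := List.length_pos_of_mem h
          omega
        have hn' : (pos.erase (i, j)).Nodup := hn.erase _
        obtain ⟨n, hmem, hstop, hlen, hiff, hnd⟩ := ih (pos := pos.erase (i, j)) (i := i + 1) (len := len + 1) (hf := hf') (hn := hn')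
        have herase : ∀ q : Int × Int, q ∈ pos.erase (i, j) ↔ q ≠ (i, j) ∧ q ∈ pos :=
          fun q => List.Nodup.mem_erase_iff hn
        refine ⟨n + 1, ?_, ?_, ?_, ?_, ?_⟩
        · intro t ht1 ht2
          by_cases hti : t = i
          · subst hti; exact h
          · have : (t, j) ∈ pos.erase (i, j) := by
              apply hmem t (by omega) (by push_cast at ht2 ⊢; omega)
            exact List.mem_of_mem_erase this
        · intro hc
          have hne : ((i + (↑(n + 1) : Int), j) : Int × Int) ≠ (i, j) := by
            simp only [ne_eq, Prod.mk.injEq, not_and]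
            intro hc2; exfalso; push_cast at hc2; omega
          have : (i + (↑(n + 1) : Int), j) ∈ pos.erase (i, j) := (herase _).mpr ⟨hne, hc⟩
          have heq : (i + (↑(n + 1) : Int)) = i + 1 + (n : Int) := by push_cast; ring
          rw [heq] at this
          exact hstop this
        · rw [hrw, hlen]; omega
        · intro q
          rw [hrw, hiff q, herase q]
          obtain ⟨q1, q2⟩ := q
          constructor
          · rintro ⟨⟨hne, hq⟩, hnr⟩
            refine ⟨hq, ?_⟩
            rintro ⟨rfl, hle, hlt⟩
            rcases eq_or_ne q1 i with rfl | hq1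
            · exact hne rfl
            · push_cast at hlt
              exact hnr ⟨rfl, by omega, by push_cast; omega⟩
          · rintro ⟨hq, hnr⟩
            refine ⟨⟨?_, hq⟩, ?_⟩
            · intro heq
              rw [Prod.mk.injEq] at heq
              obtain ⟨rfl, rfl⟩ := heq
              exact hnr ⟨rfl, by omega, by push_cast; omega⟩
            · rintro ⟨rfl, hle, hlt⟩
              push_cast at hlt
              exact hnr ⟨rfl, by omega, by push_cast; omega⟩
        · rw [hrw]; exact hnd
      · have hrw : goFwd (fuel + 1) pos i j len = (pos, len) := by
          simp [goFwd, h]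
        refine ⟨0, ?_, ?_, ?_, ?_, ?_⟩
        · intro t ht1 ht2; exfalso; push_cast at ht2; omega
        · simpa using h
        · rw [hrw]; simp
        · intro q; rw [hrw]
          constructor
          · intro hq
            refine ⟨hq, ?_⟩
            rintro ⟨_, hle, hlt⟩; push_cast at hlt; omega
          · exact fun hq => hq.1
        · rw [hrw]; exact hn

-- the property B tests: some point starts a 17-long horizontal window
def Good (pos : List (Int × Int)) : Prop :=
  ∃ p ∈ pos, ∀ d : Int, 1 ≤ d → d < 17 → (p.1 + d, p.2) ∈ pos

-- A's loop returns the max run length: it exceeds 16 iff it already did or Good holds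
theorem loopA_iff (fuel : Nat) (pos : List (Int × Int)) (hf : pos.length ≤ fuel)
    (hn : pos.Nodup) (m : Nat) :
    16 < loopA fuel pos m ↔ 16 < m ∨ Good pos := by
  induction fuel generalizing pos m with
  | zero =>
      have hp : pos = [] := List.eq_nil_of_length_eq_zero (by omega)
      subst hp
      simp [loopA, Good]
  | succ fuel ih =>
      match pos, hf, hn with
      | [], hf, hn => simp [loopA, Good]
      | (i, j) :: rest, hf, hn =>
      have hnr : rest.Nodup := hn.of_cons
      have hni : (i, j) ∉ rest := (List.nodup_cons.mp hn).1
      have HB := goBack_spec rest.length rest le_rfl hnr (i - 1) j 1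
      have hlen1 := goBack_len_le rest.length rest (i - 1) j 1
      have hrw : loopA (fuel + 1) ((i, j) :: rest) m =
          loopA fuel (goFwd (goBack rest.length rest (i - 1) j 1).1.length
              (goBack rest.length rest (i - 1) j 1).1 (i + 1) j
              (goBack rest.length rest (i - 1) j 1).2).1
            (max m (goFwd (goBack rest.length rest (i - 1) j 1).1.length
              (goBack rest.length rest (i - 1) j 1).1 (i + 1) j
              (goBack rest.length rest (i - 1) j 1).2).2) := rfl
      generalize hgen1 : goBack rest.length rest (i - 1) j 1 = r1 at HB hlen1 hrw
      obtain ⟨a, hbmem, hbstop, hblen, hbiff, hbnd⟩ := HB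
      have HF := goFwd_spec r1.1.length r1.1 le_rfl hbnd (i + 1) j r1.2
      have hlen2 := goFwd_len_le r1.1.length r1.1 (i + 1) j r1.2
      generalize hgen2 : goFwd r1.1.length r1.1 (i + 1) j r1.2 = r2 at HF hlen2 hrw
      obtain ⟨b, hfmem, hfstop, hflen, hfiff, hfnd⟩ := HF
      -- run length counted this iteration
      have hr2len : r2.2 = 1 + a + b := by rw [hflen, hblen]
      -- membership in pos
      have hpos : ∀ q : Int × Int, q ∈ (i, j) :: rest ↔ q = (i, j) ∨ q ∈ rest := by
        simp
      -- forward chain facts transferred to rest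
      have hfmem' : ∀ t : Int, i + 1 ≤ t → t < i + 1 + b → (t, j) ∈ rest := by
        intro t h1 h2
        exact ((hbiff _).mp (hfmem t h1 h2)).1
      have hfstop' : (i + 1 + b, j) ∉ rest := by
        intro hc
        apply hfstop
        rw [hbiff]
        exact ⟨hc, by rintro ⟨_, h1, h2⟩; omega⟩
      -- all run points are in pos
      have hrun : ∀ t : Int, i - a ≤ t → t ≤ i + b → (t, j) ∈ (i, j) :: rest := by
        intro t h1 h2
        rcases lt_trichotomy t i with h | h | h
        · exact List.mem_cons_of_mem _ (hbmem t (by omega) (by omega))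
        · subst h; exact List.mem_cons_self
        · exact List.mem_cons_of_mem _ (hfmem' t (by omega) (by omega))
      -- membership of the surviving set r2.1
      have hm2 : ∀ q : Int × Int, q ∈ r2.1 ↔
          q ∈ (i, j) :: rest ∧ ¬(q.2 = j ∧ i - a ≤ q.1 ∧ q.1 ≤ i + b) := by
        intro q
        rw [hfiff q, hbiff q]
        obtain ⟨q1, q2⟩ := q
        simp only [hpos, Prod.mk.injEq]
        constructor
        · rintro ⟨⟨hq, hnb⟩, hnf⟩
          refine ⟨Or.inr hq, ?_⟩
          rintro ⟨rfl, h1, h2⟩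
          rcases lt_trichotomy q1 i with h | h | h
          · exact hnb ⟨rfl, by omega, by omega⟩
          · subst h; exact hni hq
          · exact hnf ⟨rfl, by omega, by omega⟩
        · rintro ⟨hq, hnr⟩
          rcases hq with ⟨rfl, rfl⟩ | hq
          · exact absurd (hnr ⟨rfl, by omega, by omega⟩) (by simp)
          · exact ⟨⟨hq, by rintro ⟨rfl, h1, h2⟩; exact hnr ⟨rfl, by omega, by omega⟩⟩,
              by rintro ⟨rfl, h1, h2⟩; exact hnr ⟨rfl, by omega, by omega⟩⟩
      -- the boundary points are absent from pos
      have hlo : ((i - a - 1 : Int), j) ∉ (i, j) :: rest := by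
        intro hc
        rcases (hpos _).mp hc with h | h
        · rw [Prod.mk.injEq] at h; omega
        · apply hbstop
          have : (i - 1 - (a : Int)) = i - a - 1 := by ring
          rw [this]; exact h
      have hhi : ((i + b + 1 : Int), j) ∉ (i, j) :: rest := by
        intro hc
        rcases (hpos _).mp hc with h | h
        · rw [Prod.mk.injEq] at h; omega
        · apply hfstop'
          have : (i + 1 + (b : Int)) = i + b + 1 := by ring
          rw [this]; exact h
      -- the key equivalence for this iteration
      have hkey : Good ((i, j) :: rest) ↔ 16 < 1 + a + b ∨ Good r2.1 := by
        constructor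
        · rintro ⟨⟨x, y⟩, hx, hall⟩
          by_cases hint : y = j ∧ i - a ≤ x + 16 ∧ x ≤ i + b
          · left
            obtain ⟨hy, hi1, hi2⟩ := hint
            rw [hy] at hx hall
            have hxlo : i - a ≤ x := by
              by_contra hc
              apply hlo
              by_cases h0 : x = i - a - 1
              · subst h0; exact hx
              · have hm := hall (i - a - 1 - x) (by omega) (by omega)
                have heq : x + (i - a - 1 - x) = i - a - 1 := by ring
                rw [heq] at hm; exact hm
            have hxhi : x + 16 ≤ i + b := by
              by_contra hc
              apply hhi
              have hm := hall (i + b + 1 - x) (by omega) (by omega)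
              have heq : x + (i + b + 1 - x) = i + b + 1 := by ring
              rw [heq] at hm; exact hm
            omega
          · right
            refine ⟨(x, y), ?_, ?_⟩
            · rw [hm2]
              refine ⟨hx, ?_⟩
              rintro ⟨rfl, h1, h2⟩
              exact hint ⟨rfl, by omega, by omega⟩
            · intro d hd1 hd2
              rw [hm2]
              refine ⟨hall d hd1 hd2, ?_⟩
              rintro ⟨rfl, h1, h2⟩
              exact hint ⟨rfl, by omega, by omega⟩
        · rintro (h | ⟨p, hp, hall⟩)
          · refine ⟨(i - a, j), hrun _ (by omega) (by omega), ?_⟩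
            intro d hd1 hd2
            exact hrun _ (by omega) (by omega)
          · exact ⟨p, ((hm2 p).mp hp).1, fun d h1 h2 => ((hm2 _).mp (hall d h1 h2)).1⟩
      have hf2 : r2.1.length ≤ fuel := by
        simp only [List.length_cons] at hf
        omega
      rw [hrw]
      rw [ih (pos := r2.1) (m := max m r2.2) (hf := hf2) (hn := hfnd), hkey, hr2len]
      constructor
      · rintro (h | h)
        · rcases Nat.lt_or_ge 16 m with hm | hm
          · exact Or.inl hm
          · right; left; omega
        · right; right; exact h
      · rintro (h | h | h)
        · left; omega
        · left; omega
        · right; exact h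

theorem check_heuristics_spec : Claim_equal_check_heuristics := by
  intro state _
  unfold Spec_check_heuristics check_heuristics check_heuristics_alt
  have hn : (PySem.Set.ofList state).Nodup := PySem.Set.nodup_ofList state
  rw [Bool.eq_iff_iff]
  simp only [decide_eq_true_eq, List.any_eq_true, List.all_eq_true,
    PySem.List.mem_pyRange_one, PySem.Set.contains_iff]
  rw [loopA_iff (PySem.Set.ofList state).length _ le_rfl hn 0]
  constructor
  · rintro (h | ⟨p, hp, hall⟩)
    · omega
    · exact ⟨p, hp, fun d hd => hall d hd.1 hd.2⟩
  · rintro ⟨p, hp, hall⟩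
    exact Or.inr ⟨p, hp, fun d h1 h2 => hall d ⟨h1, h2⟩⟩
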